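-- pv_equiv track=rewrite | github.com/pypi-data/pypi-mirror-397 | packages/vantage-agent/vantage_agent-3.3.1a1.tar.gz/vantage_agent-3.3.1a1/vantage_agent/helpers.py | parse_slurm_nodes
-- ===== SOURCE A (Python) =====
-- def parse_slurm_nodes(output: str) -> dict[str, dict[str, str]]:
--     """Parse the output of `scontrol show nodes` and return a list of dictionaries."""
--     nodes_dict = {}
--     node_dict: dict[str, str] = {}
--
--     for line in output.splitlines():
--         line = line.strip()
--
--         if not line:
--             continue
--
--         if line.startswith("NodeName="):
--             if node_dict:
--                 nodes_dict[node_dict["NodeName"]] = {k: v for k, v in node_dict.items() if k != "NodeName"}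
--                 node_dict = {}
--             node_name = line.split("=")[1]
--             node_dict["NodeName"] = node_name
--         elif line.startswith("OS"):
--             key, value = line.split("=", 1)
--             node_dict[key.strip()] = value.strip()
--             continue
--         elif line.startswith("Reason"):
--             key, value = line.split("=", 1)
--             node_dict[key.strip()] = value.strip()
--             continue
--
--         key_value_pairs = line.split()
--         for pair in key_value_pairs:
--             if "=" in pair:
--                 key, value = pair.split("=", 1)
--                 node_dict[key.strip()] = value.strip()
--
--     # add the last element to the dictionary
--     if node_dict:
--         nodes_dict[node_dict["NodeName"]] = {k: v for k, v in node_dict.items() if k != "NodeName"}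
--
--     return nodes_dict
-- ===== SOURCE B (Python) =====
-- def parse_slurm_nodes(output: str) -> dict[str, dict[str, str]]:
--     """Parse `scontrol show nodes` output: group lines into per-node blocks, then parse each block."""
--     # Phase 1: group stripped non-blank lines into blocks, one per NodeName= header.
--     blocks = []
--     cur = None
--     for raw in output.splitlines():
--         line = raw.strip()
--         if not line:
--             continue
--         if line.startswith("NodeName="):
--             if cur is not None:
--                 blocks.append(cur)
--             cur = [line]
--         elif cur is not None:
--             cur.append(line)
--     if cur is not None:
--         blocks.append(cur)
--
--     # Phase 2: parse each block into a flat dict, then key it by its NodeName.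
--     nodes_dict = {}
--     for block in blocks:
--         d: dict[str, str] = {}
--         for line in block:
--             if line.startswith("OS") or line.startswith("Reason"):
--                 key, value = line.split("=", 1)
--                 d[key.strip()] = value.strip()
--             else:
--                 for pair in line.split():
--                     if "=" in pair:
--                         key, value = pair.split("=", 1)
--                         d[key.strip()] = value.strip()
--         nodes_dict[d["NodeName"]] = {k: v for k, v in d.items() if k != "NodeName"}
--     return nodes_dict
-- ===== Notes on version B (the rewrite author's own statement) =====
-- stated objective: alternative
-- what changed: B replaces A's single streaming loop with mutable flush-on-NodeName dict state by a two-phase pipeline: first group stripped non-blank lines into per-node blocks, then parse each block independently into a dict and assemble the result; B has no dead naive NodeName pre-parse and no end-of-loop flush of parser state.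
-- outside the precondition, e.g. on parse_slurm_nodes('c = NodeName= NodeName='): A returns {'': {'': ''}}, B returns {}
import Mathlib
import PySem

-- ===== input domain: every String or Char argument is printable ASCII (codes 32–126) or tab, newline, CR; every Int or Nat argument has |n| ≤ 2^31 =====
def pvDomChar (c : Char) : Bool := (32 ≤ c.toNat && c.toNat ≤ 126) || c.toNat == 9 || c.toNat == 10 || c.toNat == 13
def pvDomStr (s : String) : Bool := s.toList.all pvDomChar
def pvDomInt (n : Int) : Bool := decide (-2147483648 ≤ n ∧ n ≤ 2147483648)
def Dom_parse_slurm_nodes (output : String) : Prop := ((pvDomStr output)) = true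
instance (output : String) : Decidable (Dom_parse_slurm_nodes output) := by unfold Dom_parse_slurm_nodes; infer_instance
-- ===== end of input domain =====

-- B parses in two phases (group lines into per-node blocks, then parse each block) instead of
-- A's single streaming loop with flush-on-NodeName dict state; same cost, alternative decomposition.


-- ===== PORT A =====
-- the `for pair in line.split(): if "=" in pair: …` loop of A
def pvPairsA (d : PySem.Dict String String) (line : String) : PySem.Dict String String :=
  (PySem.Str.split₀ line).foldl (fun d pair =>
    if PySem.Str.isIn "=" pair then
      match PySem.Str.splitMax? pair "=" 1 with
      | some [key, value] => d.insert (PySem.Str.strip key) (PySem.Str.strip value)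
      | _ => d
    else d) d

-- one iteration of A's `for line in output.splitlines()` loop; state = (nodes_dict, node_dict)
def pvStepA (st : PySem.Dict String (List (String × String)) × PySem.Dict String String)
    (raw : String) : PySem.Dict String (List (String × String)) × PySem.Dict String String :=
  let line := PySem.Str.strip raw
  if line = "" then st
  else if PySem.Str.startswith line "NodeName=" then
    -- flush: `node_dict["NodeName"]` is a KeyError when absent — exactly the inputs Pre_ excludes
    let nodes := if st.2.items ≠ [] then
        st.1.insert ((st.2.get? "NodeName").getD "") (st.2.items.filter (fun p => p.1 ≠ "NodeName"))
      else st.1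
    let node_name := PySem.List.pyGetD ((PySem.Str.split? line "=").getD []) 1 ""  -- index 1 exists: line contains '='
    (nodes, pvPairsA ((PySem.Dict.empty).insert "NodeName" node_name) line)
  else if PySem.Str.startswith line "OS" || PySem.Str.startswith line "Reason" then
    match PySem.Str.splitMax? line "=" 1 with
    | some [key, value] => (st.1, st.2.insert (PySem.Str.strip key) (PySem.Str.strip value))
    | _ => st  -- Python raises ValueError (no '='); such inputs are outside Pre_
  else (st.1, pvPairsA st.2 line)

-- the trailing `if node_dict: nodes_dict[…] = …` flush
def pvFinishA (st : PySem.Dict String (List (String × String)) × PySem.Dict String String) :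
    List (String × List (String × String)) :=
  (if st.2.items ≠ [] then
      st.1.insert ((st.2.get? "NodeName").getD "") (st.2.items.filter (fun p => p.1 ≠ "NodeName"))
    else st.1).items

def parse_slurm_nodes (output : String) : List (String × List (String × String)) :=
  pvFinishA ((PySem.Str.splitlines output).foldl pvStepA (PySem.Dict.empty, PySem.Dict.empty))

-- ===== PORT B =====
-- B phase 2 inner: parse one line of a block into the running dict (same per-line rules as A)
def pvParseLineB (d : PySem.Dict String String) (line : String) : PySem.Dict String String :=
  if PySem.Str.startswith line "OS" || PySem.Str.startswith line "Reason" then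
    match PySem.Str.splitMax? line "=" 1 with
    | some [key, value] => d.insert (PySem.Str.strip key) (PySem.Str.strip value)
    | _ => d  -- Python raises ValueError (no '='); such inputs are outside Pre_
  else
    (PySem.Str.split₀ line).foldl (fun d pair =>
      if PySem.Str.isIn "=" pair then
        match PySem.Str.splitMax? pair "=" 1 with
        | some [key, value] => d.insert (PySem.Str.strip key) (PySem.Str.strip value)
        | _ => d
      else d) d

def pvParseBlockB (block : List String) : PySem.Dict String String :=
  block.foldl pvParseLineB PySem.Dict.empty

-- B phase 1: one iteration of the grouping loop; state = (blocks, cur)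
def pvStepB (st : List (List String) × Option (List String)) (raw : String) :
    List (List String) × Option (List String) :=
  let line := PySem.Str.strip raw
  if line = "" then st
  else if PySem.Str.startswith line "NodeName=" then
    ((match st.2 with | some cur => st.1 ++ [cur] | none => st.1), some [line])
  else
    match st.2 with
    | some cur => (st.1, some (cur ++ [line]))
    | none => st

-- B phase 2 outer: `nodes_dict[d["NodeName"]] = {k: v for k, v in d.items() if k != "NodeName"}`
def pvAssembleB (blocks : List (List String)) : PySem.Dict String (List (String × String)) :=
  blocks.foldl (fun nodes block =>
    let d := pvParseBlockB block
    nodes.insert ((d.get? "NodeName").getD "") (d.items.filter (fun p => p.1 ≠ "NodeName")))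
    PySem.Dict.empty

-- the trailing `if cur is not None: blocks.append(cur)` plus phase 2
def pvFinishB (st : List (List String) × Option (List String)) :
    List (String × List (String × String)) :=
  (pvAssembleB (match st.2 with | some cur => st.1 ++ [cur] | none => st.1)).items

def parse_slurm_nodes_alt (output : String) : List (String × List (String × String)) :=
  pvFinishB ((PySem.Str.splitlines output).foldl pvStepB ([], none))

-- ===== PRECONDITION & SPEC =====
-- Pre_ excludes the inputs on which the Python A raises or its corner behaviour is accidental:
-- a stripped non-blank line starting with "OS" or "Reason" with no '=' in it (ValueError on the
-- unpack), and non-blank lines containing '=' before the first "NodeName=" line — there A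
-- raises KeyError on the flush unless a stray mid-line "NodeName=" token happens to supply the
-- key, in which case A fabricates a phantom node from pre-header leftovers; B ignores content
-- that precedes every "NodeName=" header.
def Pre_parse_slurm_nodes (output : String) : Prop :=
  ((((PySem.Str.splitlines output).map PySem.Str.strip).filter (fun l => !(l == ""))).all
      (fun l => !(PySem.Str.startswith l "OS" || PySem.Str.startswith l "Reason")
        || PySem.Str.isIn "=" l)) = true
  ∧ (((((PySem.Str.splitlines output).map PySem.Str.strip).filter (fun l => !(l == ""))).takeWhile
      (fun l => !(PySem.Str.startswith l "NodeName="))).all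
      (fun l => !(PySem.Str.isIn "=" l))) = true
instance (output : String) : Decidable (Pre_parse_slurm_nodes output) := by
  unfold Pre_parse_slurm_nodes; infer_instance

def pvWitness_parse_slurm_nodes : String :=
  "NodeName=n1 CPUTot=4 State=IDLE\n   OS=Linux 5.4\n Reason=down [root]\n\nNodeName=n2 CPUTot=8"

def Spec_parse_slurm_nodes (output : String) (out : List (String × List (String × String))) : Prop :=
  out = parse_slurm_nodes_alt output
instance (output : String) (out : List (String × List (String × String))) :
    Decidable (Spec_parse_slurm_nodes output out) := by unfold Spec_parse_slurm_nodes; infer_instance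

-- ===== CLAIM (what is proved, stated in full; the proofs are below) =====
def Claim_equal_parse_slurm_nodes : Prop := ∀ (output : String), Dom_parse_slurm_nodes output → Pre_parse_slurm_nodes output → Spec_parse_slurm_nodes output (parse_slurm_nodes output)
-- ===== LEMMAS AND PROOFS =====

-- recursive form of Pre_'s second conjunct, structured for the induction
def pvPreNone : List String → Prop
  | [] => True
  | raw :: rest =>
    if PySem.Str.strip raw = "" then pvPreNone rest
    else if PySem.Str.startswith (PySem.Str.strip raw) "NodeName=" then True
    else PySem.Str.isIn "=" (PySem.Str.strip raw) = false ∧ pvPreNone rest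

theorem pv_go_nil (cur : List Char) (acc : List (List Char)) :
    PySem.Chars.split₀.go [] cur acc = if cur.isEmpty then acc.reverse else (cur.reverse :: acc).reverse := by
  simp [PySem.Chars.split₀.go]

theorem pv_go_sp (c : Char) (rest cur : List Char) (acc : List (List Char)) (h : PySem.Chars.isspace c = true) :
    PySem.Chars.split₀.go (c :: rest) cur acc =
      if cur.isEmpty then PySem.Chars.split₀.go rest [] acc
      else PySem.Chars.split₀.go rest [] (cur.reverse :: acc) := by
  rw [PySem.Chars.split₀.go.eq_def]; simp [h]

theorem pv_go_ns (c : Char) (rest cur : List Char) (acc : List (List Char)) (h : PySem.Chars.isspace c = false) :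
    PySem.Chars.split₀.go (c :: rest) cur acc = PySem.Chars.split₀.go rest (c :: cur) acc := by
  rw [PySem.Chars.split₀.go.eq_def]; simp [h]

theorem pv_go_acc (r : List Char) (cur : List Char) (acc : List (List Char)) :
    PySem.Chars.split₀.go r cur acc = acc.reverse ++ PySem.Chars.split₀.go r cur [] := by
  induction r generalizing cur acc with
  | nil => by_cases h : cur.isEmpty <;> simp [pv_go_nil, h]
  | cons c rest ih =>
    by_cases hs : PySem.Chars.isspace c
    · rw [pv_go_sp _ _ _ _ hs, pv_go_sp _ _ _ _ hs]
      by_cases h : cur.isEmpty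
      · simp only [h, if_true]; exact ih _ _
      · simp only [h, if_false]
        rw [ih [] (cur.reverse :: acc), ih [] [cur.reverse]]
        simp
    · simp only [Bool.not_eq_true] at hs
      rw [pv_go_ns _ _ _ _ hs, pv_go_ns _ _ _ _ hs]; exact ih _ _

theorem pv_go_nonspace_prefix (p : List Char) (r cur : List Char) (acc : List (List Char))
    (hp : ∀ c ∈ p, PySem.Chars.isspace c = false) :
    PySem.Chars.split₀.go (p ++ r) cur acc = PySem.Chars.split₀.go r (p.reverse ++ cur) acc := by
  induction p generalizing cur with
  | nil => simp
  | cons c p' ih =>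
    rw [List.cons_append, pv_go_ns _ _ _ _ (hp c (by simp)), ih _ (fun c hc => hp c (by simp [hc]))]
    simp

theorem pv_go_head (r : List Char) (cur : List Char) (acc : List (List Char)) (h : cur ≠ []) :
    ∃ t ts, PySem.Chars.split₀.go r cur acc = acc.reverse ++ t :: ts ∧ cur.reverse <+: t := by
  induction r generalizing cur acc with
  | nil =>
    refine ⟨cur.reverse, [], ?_, List.prefix_refl _⟩
    simp [pv_go_nil, List.isEmpty_iff, h]
  | cons c rest ih =>
    by_cases hs : PySem.Chars.isspace c
    · rw [pv_go_sp _ _ _ _ hs]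
      simp only [List.isEmpty_iff, h, if_false]
      refine ⟨cur.reverse, PySem.Chars.split₀.go rest [] [], ?_, List.prefix_refl _⟩
      rw [pv_go_acc]; simp
    · simp only [Bool.not_eq_true] at hs
      rw [pv_go_ns _ _ _ _ hs]
      obtain ⟨t, ts, heq, hpre⟩ := ih (c :: cur) acc (by simp)
      exact ⟨t, ts, heq, List.IsPrefix.trans (by simp) hpre⟩

theorem pv_go_chars (r : List Char) (cur : List Char) (acc : List (List Char)) (t : List Char)
    (ht : t ∈ PySem.Chars.split₀.go r cur acc) (c : Char) (hc : c ∈ t) :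
    c ∈ r ∨ c ∈ cur ∨ ∃ u ∈ acc, c ∈ u := by
  induction r generalizing cur acc with
  | nil =>
    rw [pv_go_nil] at ht
    by_cases h : cur.isEmpty
    · simp only [h, if_true, List.mem_reverse] at ht
      right; right; exact ⟨t, ht, hc⟩
    · simp only [h, if_false] at ht
      rw [List.reverse_cons] at ht
      rcases List.mem_append.mp ht with ht | ht
      · right; right; exact ⟨t, List.mem_reverse.mp ht, hc⟩
      · right; left; rw [← List.mem_reverse, ← List.mem_singleton.mp ht]; exact hc
  | cons a rest ih =>
    by_cases hs : PySem.Chars.isspace a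
    · rw [pv_go_sp _ _ _ _ hs] at ht
      by_cases h : cur.isEmpty
      · simp only [h, if_true] at ht
        rcases ih _ _ ht with h' | h' | h'
        · left; simp [h']
        · simp [List.isEmpty_iff.mp h] at h'
        · right; right; exact h'
      · simp only [h, if_false] at ht
        rcases ih _ _ ht with h' | h' | h'
        · left; simp [h']
        · simp at h'
        · rcases h' with ⟨u, hu, hcu⟩
          simp at hu
          rcases hu with hu | hu
          · right; left; rw [← List.mem_reverse, ← hu]; exact hcu
          · right; right; exact ⟨u, hu, hcu⟩
    · simp only [Bool.not_eq_true] at hs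
      rw [pv_go_ns _ _ _ _ hs] at ht
      rcases ih _ _ ht with h | h | h
      · left; simp [h]
      · simp at h; rcases h with h | h
        · left; simp [h]
        · right; left; exact h
      · right; right; exact h

theorem pv_sm_zero (f : Nat) (l cur : List Char) (acc : List (List Char)) :
    PySem.Chars.splitOnMax.go ['='] f 0 l cur acc = ((cur.reverse ++ l) :: acc).reverse := by
  cases f with
  | zero => rw [PySem.Chars.splitOnMax.go.eq_def]
  | succ f => cases l with
    | nil => rw [PySem.Chars.splitOnMax.go.eq_def]; simp
    | cons c rest => rw [PySem.Chars.splitOnMax.go.eq_def]; simp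

theorem pv_sm_one (a : List Char) (f : Nat) (b cur : List Char) (acc : List (List Char))
    (ha : '=' ∉ a) (hf : a.length < f) :
    PySem.Chars.splitOnMax.go ['='] f 1 (a ++ '=' :: b) cur acc =
      acc.reverse ++ [cur.reverse ++ a, b] := by
  induction a generalizing f cur with
  | nil =>
    cases f with
    | zero => omega
    | succ f =>
      rw [PySem.Chars.splitOnMax.go.eq_def]
      simp only [List.nil_append]
      have : List.isPrefixOf ['='] ('=' :: b) = true := by simp [List.isPrefixOf]
      simp [this, pv_sm_zero]
  | cons c a' ih =>
    cases f with
    | zero => omega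
    | succ f =>
      have hc : c ≠ '=' := by intro h; exact ha (by simp [h])
      rw [List.cons_append, PySem.Chars.splitOnMax.go.eq_def]
      have : List.isPrefixOf ['='] (c :: (a' ++ '=' :: b)) = false := by
        simp [List.isPrefixOf]; exact fun h => absurd h.symm hc
      simp only [this, Bool.false_eq_true, if_false, reduceCtorEq]
      have := ih f (c :: cur) (fun h => ha (by simp [h])) (by simpa using Nat.lt_of_succ_lt_succ hf)
      simp only [Nat.add_eq, if_neg (by omega : ¬ (1 : Nat) = 0)] at this ⊢
      rw [this]; simp

theorem pv_sm_none (a : List Char) (f : Nat) (cur : List Char) (acc : List (List Char))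
    (ha : '=' ∉ a) (hf : a.length < f) :
    PySem.Chars.splitOnMax.go ['='] f 1 a cur acc = ((cur.reverse ++ a) :: acc).reverse := by
  induction a generalizing f cur with
  | nil =>
    cases f with
    | zero => omega
    | succ f => rw [PySem.Chars.splitOnMax.go.eq_def]; simp
  | cons c a' ih =>
    cases f with
    | zero => omega
    | succ f =>
      have hc : c ≠ '=' := by intro h; exact ha (by simp [h])
      rw [PySem.Chars.splitOnMax.go.eq_def]
      have : List.isPrefixOf ['='] (c :: a') = false := by
        simp [List.isPrefixOf]; exact fun h => absurd h.symm hc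
      simp only [this, Bool.false_eq_true, if_false, reduceCtorEq]
      have := ih f (c :: cur) (fun h => ha (by simp [h])) (by simpa using Nat.lt_of_succ_lt_succ hf)
      simp only [Nat.add_eq, if_neg (by omega : ¬ (1 : Nat) = 0)] at this ⊢
      rw [this]; simp

-- string-level: s.split("=", 1) when s contains no '='
theorem pv_splitMax_no_eq (s : List Char) (h : '=' ∉ s) :
    PySem.Chars.splitMax? s ['='] 1 = some [s] := by
  rw [PySem.Chars.splitMax?]
  simp only [List.isEmpty_iff, reduceCtorEq, if_false]
  rw [PySem.Chars.splitOnMax]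
  simp only [if_neg (by omega : ¬ (1:Int) < 0)]
  rw [show ((1:Int)).toNat = 1 from rfl, pv_sm_none s (s.length + 1) [] [] h (by omega)]
  simp

theorem pv_splitMax_first (a b : List Char) (h : '=' ∉ a) :
    PySem.Chars.splitMax? (a ++ '=' :: b) ['='] 1 = some [a, b] := by
  rw [PySem.Chars.splitMax?]
  simp only [List.isEmpty_iff, reduceCtorEq, if_false]
  rw [PySem.Chars.splitOnMax]
  simp only [if_neg (by omega : ¬ (1:Int) < 0)]
  rw [show ((1:Int)).toNat = 1 from rfl, pv_sm_one a ((a ++ '=' :: b).length + 1) b [] [] h (by simp)]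
  simp
theorem pv_nds_nonspace : ∀ c ∈ "NodeName=".toList, PySem.Chars.isspace c = false := by
  have h : "NodeName=".toList = ['N','o','d','e','N','a','m','e','='] := rfl
  rw [h]; intro c hc; fin_cases hc <;> rfl

theorem pv_tok1 (line : String) (h : PySem.Str.startswith line "NodeName=" = true) :
    ∃ (t' : List Char) (ts : List (List Char)),
      PySem.Chars.split₀ line.toList = ("NodeName=".toList ++ t') :: ts := by
  have hpre : "NodeName=".toList <+: line.toList := by
    have := PySem.Chars.startswith_iff (s := line.toList) (p := "NodeName=".toList)
    simp at h
    exact this.mp (by simpa using h)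
  obtain ⟨r, hr⟩ := hpre
  rw [PySem.Chars.split₀, ← hr,
    pv_go_nonspace_prefix _ _ _ _ pv_nds_nonspace]
  obtain ⟨t, ts, heq, hp⟩ := pv_go_head r ("NodeName=".toList.reverse ++ []) [] (by simp)
  obtain ⟨t', ht'⟩ := hp
  refine ⟨t', ts, ?_⟩
  rw [heq]
  simp only [List.reverse_nil, List.nil_append] at *
  rw [← ht']
  simp

theorem pv_singleton_infix (l : List Char) (c : Char) : [c] <:+: l ↔ c ∈ l := by
  constructor
  · intro h; exact h.mem (by simp)
  · intro h; obtain ⟨a, b, rfl⟩ := List.mem_iff_append.mp h; exact ⟨a, b, by simp⟩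

theorem pv_isIn_eq_mem (s : String) : PySem.Str.isIn "=" s = true ↔ '=' ∈ s.toList := by
  rw [show ((PySem.Str.isIn "=" s) = true) ↔ PySem.Chars.isIn "=".toList s.toList = true by simp]
  rw [PySem.Chars.isIn_iff_infix]
  exact pv_singleton_infix _ _

theorem pv_isIn_false (s : String) (h : '=' ∉ s.toList) : PySem.Str.isIn "=" s = false := by
  rw [Bool.eq_false_iff]; intro hc; exact h ((pv_isIn_eq_mem s).mp hc)

theorem pv_pairsA_no_eq (line : String) (h : '=' ∉ line.toList)
    (d : PySem.Dict String String) : pvPairsA d line = d := by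
  unfold pvPairsA
  have htoks : ∀ t ∈ PySem.Str.split₀ line, PySem.Str.isIn "=" t = false := by
    intro t ht
    rw [PySem.Str.split₀] at ht
    obtain ⟨u, hu, rfl⟩ := List.mem_map.mp ht
    apply pv_isIn_false
    rw [String.toList_ofList]
    intro hmem
    rcases pv_go_chars _ _ _ _ hu _ hmem with h' | h' | h'
    · exact h h'
    · simp at h'
    · simp at h'
  generalize hts : PySem.Str.split₀ line = toks at htoks ⊢
  clear hts
  induction toks generalizing d with
  | nil => rfl
  | cons t ts ih =>
    rw [List.foldl_cons]
    have hf : PySem.Str.isIn "=" t = false := htoks t (by simp)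
    simp only [hf, Bool.false_eq_true, if_false]
    exact ih d (fun t ht => htoks t (by simp [ht]))

theorem pv_mem_eq_nds : '=' ∈ "NodeName=".toList := by
  rw [show "NodeName=".toList = ['N','o','d','e','N','a','m','e','='] from rfl]; simp

theorem pv_not_mem_eq_nn : '=' ∉ "NodeName".toList := by
  rw [show "NodeName".toList = ['N','o','d','e','N','a','m','e'] from rfl]; simp

theorem pv_strip_nodename : PySem.Str.strip "NodeName" = "NodeName" := by rfl

theorem pv_header_not_os (line : String) (h : PySem.Str.startswith line "NodeName=" = true) :
    (PySem.Str.startswith line "OS" || PySem.Str.startswith line "Reason") = false := by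
  have hpre : "NodeName=".toList <+: line.toList := by
    have := PySem.Chars.startswith_iff (s := line.toList) (p := "NodeName=".toList)
    simp at h
    exact this.mp (by simpa using h)
  obtain ⟨r, hr⟩ := hpre
  have hl : line.toList = 'N' :: ("odeName=".toList ++ r) := by rw [← hr]; rfl
  have h1 : PySem.Chars.startswith line.toList "OS".toList = false := by rw [hl]; rfl
  have h2 : PySem.Chars.startswith line.toList "Reason".toList = false := by rw [hl]; rfl
  simp only [PySem.Str.startswith_eq, h1, h2, Bool.or_self]

theorem pv_pairsA_header (line : String) (h : PySem.Str.startswith line "NodeName=" = true)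
    (x : String) :
    pvPairsA ((PySem.Dict.empty).insert "NodeName" x) line = pvPairsA PySem.Dict.empty line := by
  obtain ⟨t', ts, hsp⟩ := pv_tok1 line h
  unfold pvPairsA
  rw [PySem.Str.split₀, hsp]
  rw [List.map_cons, List.foldl_cons, List.foldl_cons]
  congr 1
  have htl : (String.ofList ("NodeName=".toList ++ t')).toList = "NodeName".toList ++ '=' :: t' := by
    rw [String.toList_ofList]; rfl
  have hin : PySem.Str.isIn "=" (String.ofList ("NodeName=".toList ++ t')) = true := by
    rw [pv_isIn_eq_mem, String.toList_ofList]
    exact List.mem_append.mpr (Or.inl pv_mem_eq_nds)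
  have hsm : PySem.Str.splitMax? (String.ofList ("NodeName=".toList ++ t')) "=" 1 =
      some ["NodeName", String.ofList t'] := by
    rw [PySem.Str.splitMax?, htl, show "=".toList = ['='] from rfl,
      pv_splitMax_first _ _ pv_not_mem_eq_nn]
    simp [String.ofList_toList]
  simp only [hin, if_true, hsm, pv_strip_nodename]
  rw [PySem.Dict.insert_insert_self]

theorem pv_parseLineB_not_osr (d : PySem.Dict String String) (line : String)
    (h : (PySem.Str.startswith line "OS" || PySem.Str.startswith line "Reason") = false) :
    pvParseLineB d line = pvPairsA d line := by
  unfold pvParseLineB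
  rw [h]
  rfl

theorem pv_stepA_other (nodes : PySem.Dict String (List (String × String)))
    (d : PySem.Dict String String) (raw : String)
    (hne : ¬ PySem.Str.strip raw = "")
    (hh : PySem.Str.startswith (PySem.Str.strip raw) "NodeName=" = false) :
    pvStepA (nodes, d) raw = (nodes, pvParseLineB d (PySem.Str.strip raw)) := by
  unfold pvStepA pvParseLineB
  simp only [hne, if_false, hh, Bool.false_eq_true]
  by_cases hos : (PySem.Str.startswith (PySem.Str.strip raw) "OS" ||
      PySem.Str.startswith (PySem.Str.strip raw) "Reason") = true
  · simp only [hos, if_true]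
    cases hsm : PySem.Str.splitMax? (PySem.Str.strip raw) "=" 1 with
    | none => rfl
    | some l =>
      match l with
      | [] => rfl
      | [a] => rfl
      | [a, b] => rfl
      | a :: b :: c :: rest => rfl
  · simp only [Bool.not_eq_true] at hos
    simp only [hos, Bool.false_eq_true, if_false]
    rfl

theorem pv_insert_ne_nil (d : PySem.Dict String String) (k v : String) :
    (d.insert k v).items ≠ [] := by
  rw [PySem.Dict.items_insert]
  split_ifs with hc
  · intro habs
    rw [List.map_eq_nil_iff] at habs
    cases d with
    | mk items =>
      cases items with
      | nil => simp at hc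
      | cons a b => simp at habs
  · simp

theorem pv_fold_ne (ts : List String) (d : PySem.Dict String String) (h : d.items ≠ []) :
    ((ts.foldl (fun d pair =>
      if PySem.Str.isIn "=" pair then
        match PySem.Str.splitMax? pair "=" 1 with
        | some [key, value] => d.insert (PySem.Str.strip key) (PySem.Str.strip value)
        | _ => d
      else d) d).items) ≠ [] := by
  induction ts generalizing d with
  | nil => exact h
  | cons t ts ih =>
    rw [List.foldl_cons]
    apply ih
    by_cases hin : PySem.Str.isIn "=" t = true
    · simp only [hin, if_true]
      cases PySem.Str.splitMax? t "=" 1 with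
      | none => exact h
      | some l =>
        match l with
        | [] => exact h
        | [a] => exact h
        | [a, b] => exact pv_insert_ne_nil _ _ _
        | a :: b :: c :: rest => exact h
    · simp only [Bool.not_eq_true] at hin
      simp only [hin, Bool.false_eq_true, if_false]
      exact h

theorem pv_parseLineB_ne (d : PySem.Dict String String) (line : String) (h : d.items ≠ []) :
    (pvParseLineB d line).items ≠ [] := by
  unfold pvParseLineB
  split
  · cases hsm : PySem.Str.splitMax? line "=" 1 with
    | none => exact h
    | some l =>
      match l with
      | [] => exact h
      | [a] => exact h
      | [a, b] => exact pv_insert_ne_nil _ _ _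
      | a :: b :: c :: rest => exact h
  · exact pv_fold_ne _ _ h

theorem pv_pairsA_header_ne (line : String)
    (h : PySem.Str.startswith line "NodeName=" = true) :
    (pvPairsA PySem.Dict.empty line).items ≠ [] := by
  obtain ⟨t', ts, hsp⟩ := pv_tok1 line h
  unfold pvPairsA
  rw [PySem.Str.split₀, hsp, List.map_cons, List.foldl_cons]
  apply pv_fold_ne
  have hin : PySem.Str.isIn "=" (String.ofList ("NodeName=".toList ++ t')) = true := by
    rw [pv_isIn_eq_mem, String.toList_ofList]
    exact List.mem_append.mpr (Or.inl pv_mem_eq_nds)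
  have hsm : PySem.Str.splitMax? (String.ofList ("NodeName=".toList ++ t')) "=" 1 =
      some ["NodeName", String.ofList t'] := by
    rw [PySem.Str.splitMax?, String.toList_ofList,
      show "NodeName=".toList ++ t' = "NodeName".toList ++ '=' :: t' from rfl,
      show "=".toList = ['='] from rfl, pv_splitMax_first _ _ pv_not_mem_eq_nn]
    rfl
  simp only [hin, if_true, hsm]
  exact pv_insert_ne_nil _ _ _

theorem pv_preNone_of_all (ls : List String)
    (h : (((ls.map PySem.Str.strip).filter (fun l => !(l == ""))).takeWhile
      (fun l => !(PySem.Str.startswith l "NodeName="))).all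
      (fun l => !(PySem.Str.isIn "=" l)) = true) :
    pvPreNone ls := by
  induction ls with
  | nil => trivial
  | cons raw rest ih =>
    by_cases hb : PySem.Str.strip raw = ""
    · simp only [pvPreNone, hb, if_true]
      apply ih
      have hcond : (!(PySem.Str.strip raw == "")) = false := by rw [hb]; rfl
      simp only [List.map_cons, List.filter_cons, hcond, Bool.false_eq_true, if_false] at h
      exact h
    · by_cases hh : PySem.Str.startswith (PySem.Str.strip raw) "NodeName=" = true
      · simp only [pvPreNone]
        rw [if_neg hb, if_pos hh]
        trivial
      · simp only [Bool.not_eq_true] at hh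
        simp only [List.map_cons, List.filter_cons, hb, List.takeWhile_cons, hh,
          Bool.not_false, if_true, List.all_cons, Bool.and_eq_true, bne_iff_ne, ne_eq,
          not_false_eq_true, beq_eq_false_iff_ne, Bool.not_eq_true'] at h
        simp only [pvPreNone, hb, if_false, hh, Bool.false_eq_true]
        exact ⟨by simpa using h.1, ih (by simpa using h.2)⟩

theorem pv_assemble_append (blocks : List (List String)) (c : List String) :
    pvAssembleB (blocks ++ [c]) = (pvAssembleB blocks).insert
      (((pvParseBlockB c).get? "NodeName").getD "")
      ((pvParseBlockB c).items.filter (fun p => p.1 ≠ "NodeName")) := by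
  unfold pvAssembleB
  rw [List.foldl_append]
  rfl

theorem pv_mainSome (ls : List String) (blocks : List (List String)) (c : List String)
    (h : (pvParseBlockB c).items ≠ []) :
    pvFinishA (ls.foldl pvStepA (pvAssembleB blocks, pvParseBlockB c)) =
    pvFinishB (ls.foldl pvStepB (blocks, some c)) := by
  induction ls generalizing blocks c with
  | nil =>
    unfold pvFinishA pvFinishB
    simp only [List.foldl_nil]
    rw [if_pos h, pv_assemble_append]
  | cons raw ls ih =>
    rw [List.foldl_cons, List.foldl_cons]
    by_cases hb : PySem.Str.strip raw = ""
    · rw [show pvStepA (pvAssembleB blocks, pvParseBlockB c) raw = (pvAssembleB blocks, pvParseBlockB c) by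
        unfold pvStepA; rw [if_pos hb]]
      rw [show pvStepB (blocks, some c) raw = (blocks, some c) by
        unfold pvStepB; rw [if_pos hb]]
      exact ih blocks c h
    · by_cases hh : PySem.Str.startswith (PySem.Str.strip raw) "NodeName=" = true
      · have hA : pvStepA (pvAssembleB blocks, pvParseBlockB c) raw =
            (pvAssembleB (blocks ++ [c]), pvParseBlockB [PySem.Str.strip raw]) := by
          unfold pvStepA
          rw [if_neg hb, if_pos hh, if_pos h, ← pv_assemble_append]
          have hnode : pvPairsA ((PySem.Dict.empty).insert "NodeName"
              (PySem.List.pyGetD ((PySem.Str.split? (PySem.Str.strip raw) "=").getD []) 1 ""))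
              (PySem.Str.strip raw) = pvParseBlockB [PySem.Str.strip raw] := by
            rw [pv_pairsA_header _ hh]
            unfold pvParseBlockB
            rw [List.foldl_cons, List.foldl_nil,
              pv_parseLineB_not_osr _ _ (pv_header_not_os _ hh)]
          exact congrArg (fun z => (pvAssembleB (blocks ++ [c]), z)) hnode
        have hB : pvStepB (blocks, some c) raw = (blocks ++ [c], some [PySem.Str.strip raw]) := by
          unfold pvStepB
          rw [if_neg hb, if_pos hh]
        rw [hA, hB]
        apply ih
        unfold pvParseBlockB
        rw [List.foldl_cons, List.foldl_nil,
          pv_parseLineB_not_osr _ _ (pv_header_not_os _ hh)]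
        exact pv_pairsA_header_ne _ hh
      · simp only [Bool.not_eq_true] at hh
        have hA := pv_stepA_other (pvAssembleB blocks) (pvParseBlockB c) raw hb hh
        have hB : pvStepB (blocks, some c) raw = (blocks, some (c ++ [PySem.Str.strip raw])) := by
          unfold pvStepB
          rw [if_neg hb, hh]
          rfl
        have hblk : pvParseBlockB (c ++ [PySem.Str.strip raw]) =
            pvParseLineB (pvParseBlockB c) (PySem.Str.strip raw) := by
          unfold pvParseBlockB
          rw [List.foldl_append, List.foldl_cons, List.foldl_nil]
        rw [hA, hB, ← hblk]
        exact ih blocks _ (by rw [hblk]; exact pv_parseLineB_ne _ _ h)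

theorem pv_splitMax_no_eq_str (l : String) (h : PySem.Str.isIn "=" l = false) :
    PySem.Str.splitMax? l "=" 1 = some [l] := by
  have hm : '=' ∉ l.toList := by
    intro hc
    have hx := (pv_isIn_eq_mem l).mpr hc
    rw [h] at hx
    exact Bool.false_ne_true hx
  rw [PySem.Str.splitMax?, show "=".toList = ['='] from rfl, pv_splitMax_no_eq _ hm]
  simp [String.ofList_toList]

theorem pv_stepA_skip (st : PySem.Dict String (List (String × String)) × PySem.Dict String String)
    (raw : String) (hb : ¬ PySem.Str.strip raw = "")
    (hh : PySem.Str.startswith (PySem.Str.strip raw) "NodeName=" = false)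
    (hmem : '=' ∉ (PySem.Str.strip raw).toList) :
    pvStepA st raw = st := by
  rw [pv_stepA_other st.1 st.2 raw hb hh]
  unfold pvParseLineB
  split
  · rw [pv_splitMax_no_eq_str _ (pv_isIn_false _ hmem)]
  · rw [show ((PySem.Str.split₀ (PySem.Str.strip raw)).foldl (fun d pair =>
        if PySem.Str.isIn "=" pair = true then
          match PySem.Str.splitMax? pair "=" 1 with
          | some [key, value] => d.insert (PySem.Str.strip key) (PySem.Str.strip value)
          | _ => d
        else d) st.2) = st.2 from pv_pairsA_no_eq _ hmem st.2]

theorem pv_mainNone (ls : List String) (hpre : pvPreNone ls) :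
    pvFinishA (ls.foldl pvStepA (PySem.Dict.empty, PySem.Dict.empty)) =
    pvFinishB (ls.foldl pvStepB ([], none)) := by
  induction ls with
  | nil => rfl
  | cons raw ls ih =>
    rw [List.foldl_cons, List.foldl_cons]
    by_cases hb : PySem.Str.strip raw = ""
    · rw [show pvStepA (PySem.Dict.empty, PySem.Dict.empty) raw = (PySem.Dict.empty, PySem.Dict.empty) by
        unfold pvStepA; rw [if_pos hb]]
      rw [show pvStepB (([] : List (List String)), (none : Option (List String))) raw = ([], none) by
        unfold pvStepB; rw [if_pos hb]]
      exact ih (by simpa [pvPreNone, hb] using hpre)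
    · by_cases hh : PySem.Str.startswith (PySem.Str.strip raw) "NodeName=" = true
      · have hA : pvStepA (PySem.Dict.empty, PySem.Dict.empty) raw =
            (pvAssembleB [], pvParseBlockB [PySem.Str.strip raw]) := by
          unfold pvStepA
          rw [if_neg hb, if_pos hh, if_neg (by simp [PySem.Dict.empty])]
          have hnode : pvPairsA ((PySem.Dict.empty).insert "NodeName"
              (PySem.List.pyGetD ((PySem.Str.split? (PySem.Str.strip raw) "=").getD []) 1 ""))
              (PySem.Str.strip raw) = pvParseBlockB [PySem.Str.strip raw] := by
            rw [pv_pairsA_header _ hh]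
            unfold pvParseBlockB
            rw [List.foldl_cons, List.foldl_nil,
              pv_parseLineB_not_osr _ _ (pv_header_not_os _ hh)]
          exact congrArg (fun z => ((PySem.Dict.empty : PySem.Dict String (List (String × String))), z)) hnode
        have hB : pvStepB (([] : List (List String)), (none : Option (List String))) raw =
            ([], some [PySem.Str.strip raw]) := by
          unfold pvStepB
          rw [if_neg hb, if_pos hh]
        rw [hA, hB]
        apply pv_mainSome
        unfold pvParseBlockB
        rw [List.foldl_cons, List.foldl_nil,
          pv_parseLineB_not_osr _ _ (pv_header_not_os _ hh)]
        exact pv_pairsA_header_ne _ hh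
      · simp only [Bool.not_eq_true] at hh
        have hpre' : PySem.Str.isIn "=" (PySem.Str.strip raw) = false ∧ pvPreNone ls := by
          have h2 := hpre
          simp only [pvPreNone] at h2
          rw [if_neg hb, if_neg (show ¬ (PySem.Str.startswith (PySem.Str.strip raw) "NodeName=" = true) from by
            rw [hh]; exact Bool.false_ne_true)] at h2
          exact h2
        have hmem : '=' ∉ (PySem.Str.strip raw).toList := by
          intro hc
          have hx := (pv_isIn_eq_mem _).mpr hc
          rw [hpre'.1] at hx
          exact Bool.false_ne_true hx
        rw [pv_stepA_skip _ _ hb hh hmem]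
        rw [show pvStepB (([] : List (List String)), (none : Option (List String))) raw = ([], none) by
          unfold pvStepB; rw [if_neg hb, hh]; rfl]
        exact ih hpre'.2

-- ===== VERDICT (by name: the statement is the Claim_ definition above) =====
theorem parse_slurm_nodes_spec : Claim_equal_parse_slurm_nodes := by
  intro output _ hpre
  unfold Spec_parse_slurm_nodes parse_slurm_nodes parse_slurm_nodes_alt
  exact pv_mainNone _ (pv_preNone_of_all _ hpre.2)
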